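-- pv_equiv track=rewrite | github.com/elchukc/Jack-Compiler | MyCompiler/JackTokenizer.py | splitSymbols
-- ===== SOURCE A (Python) =====
-- def splitSymbols(word):
--   symbols = ( '{', '}', '(', ')', '[', ']', '.', ',', ';', '+', '-', '*',
--               '/', '&', '|', '<', '>', '=', '~' )
--   final = []
--   # get indices of any symbols in the term
--   i = 0
--   j = 0
--   k = -1
--   while i < len(word):
--     #if word[i] in symbols or word[i] == '\"':
--     if word[i] in symbols:
--       if i != j: # or i == len(word) ??
--         final.append(word[j:i])
--       final.append(word[i])
--       j = i + 1
--       k = -1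
--     elif word[i].isalnum() and k == -1:
--       k = i
--     i += 1
--   # finally, if there's any words on the end of the chunk
--   if k != -1:
--     final.append(word[k:])
--   return final
-- ===== SOURCE B (Python) =====
-- def splitSymbols(word):
--   symbols = ( '{', '}', '(', ')', '[', ']', '.', ',', ';', '+', '-', '*',
--               '/', '&', '|', '<', '>', '=', '~' )
--   # table-then-pass: collect all symbol positions first, then emit chunks between them
--   bounds = [(i, c) for i, c in enumerate(word) if c in symbols]
--   out = []
--   prev = 0
--   for i, c in bounds:
--     if prev < i:
--       out.append(word[prev:i])
--     out.append(c)
--     prev = i + 1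
--   tail = word[prev:]
--   for off, c in enumerate(tail):
--     if c.isalnum():
--       out.append(tail[off:])
--       break
--   return out
-- ===== Notes on version B (the rewrite author's own statement) =====
-- stated objective: alternative
-- what changed: Replaces A's single while-loop with inline j/k state tracking by a table-then-pass structure: first build the list of (index, char) symbol boundaries via enumerate, then emit the chunks between consecutive boundaries, and finally trim the trailing chunk to its first alphanumeric character in a separate scan.
import Mathlib
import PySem

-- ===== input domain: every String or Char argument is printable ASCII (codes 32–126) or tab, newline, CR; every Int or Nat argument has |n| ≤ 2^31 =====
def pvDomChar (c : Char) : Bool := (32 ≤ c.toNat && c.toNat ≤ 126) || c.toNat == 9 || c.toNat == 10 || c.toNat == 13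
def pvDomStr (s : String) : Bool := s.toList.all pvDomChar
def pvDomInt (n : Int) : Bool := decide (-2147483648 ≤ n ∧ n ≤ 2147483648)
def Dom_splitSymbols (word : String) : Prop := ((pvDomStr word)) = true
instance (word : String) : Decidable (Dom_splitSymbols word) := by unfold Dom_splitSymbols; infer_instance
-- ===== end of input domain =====

-- B replaces A's inline j/k while-loop by a boundary-table-then-pass decomposition (same cost, different structure).


-- ===== PORT A =====
-- the `symbols` tuple; `c in symbols` is membership
def pvIsSymbol (c : Char) : Bool :=
  c ∈ ['{', '}', '(', ')', '[', ']', '.', ',', ';', '+', '-', '*',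
       '/', '&', '|', '<', '>', '=', '~']

-- A's while-loop body on state (final, j, k) and the current (i, word[i]);
-- string slices are exact on code points: word[j:i] = PySem.List.slice on word.toList
def pvStepA (cs : List Char) (st : List String × Int × Int) (p : Int × Char) :
    List String × Int × Int :=
  if pvIsSymbol p.2 then
    ((if p.1 ≠ st.2.1 then
        st.1 ++ [String.ofList (PySem.List.slice cs (some st.2.1) (some p.1))] else st.1)
       ++ [String.ofList [p.2]], p.1 + 1, -1)
  else if PySem.Chars.isalnum p.2 ∧ st.2.2 = -1 then (st.1, st.2.1, p.1)
  else st

def splitSymbols (word : String) : List String :=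
  let cs := word.toList
  let r := (PySem.List.pyRange 0 (PySem.Str.len word) 1).foldl
      (fun st i => pvStepA cs st (i, PySem.List.pyGetD cs i ' ')) ([], 0, -1)
  if r.2.2 ≠ -1 then r.1 ++ [String.ofList (PySem.List.slice cs (some r.2.2) none)] else r.1

-- ===== PORT B =====
-- B's per-boundary body on state (out, prev) and boundary (i, c)
def pvStepB (cs : List Char) (st : List String × Int) (p : Int × Char) : List String × Int :=
  ((if st.2 < p.1 then
      st.1 ++ [String.ofList (PySem.List.slice cs (some st.2) (some p.1))] else st.1)
     ++ [String.ofList [p.2]], p.1 + 1)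

def splitSymbols_alt (word : String) : List String :=
  let cs := word.toList
  let bounds := (PySem.List.enumerate cs 0).filter (fun p => pvIsSymbol p.2)
  let r := bounds.foldl (pvStepB cs) ([], 0)
  let tail := PySem.List.slice cs (some r.2) none
  match (PySem.List.enumerate tail 0).find? (fun p => PySem.Chars.isalnum p.2) with
  | some q => r.1 ++ [String.ofList (PySem.List.slice tail (some q.1) none)]
  | none => r.1

-- ===== PRECONDITION & SPEC =====
def Spec_splitSymbols (word : String) (out : List String) : Prop := out = splitSymbols_alt word
instance (word : String) (out : List String) : Decidable (Spec_splitSymbols word out) := by unfold Spec_splitSymbols; infer_instance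

-- ===== CLAIM (what is proved, stated in full; the proofs are below) =====
def Claim_equal_splitSymbols : Prop := ∀ (word : String), Dom_splitSymbols word → Spec_splitSymbols word (splitSymbols word)

-- ===== LEMMAS AND PROOFS =====

-- common reference splitter: pend = chars since the last symbol, rest = remaining input
def pvGo (pend rest : List Char) : List String :=
  match rest with
  | [] =>
    match pend.findIdx? (fun c => PySem.Chars.isalnum c) with
    | some m => [String.ofList (pend.drop m)]
    | none => []
  | c :: rs =>
    if pvIsSymbol c then
      (if pend = [] then [] else [String.ofList pend]) ++ String.ofList [c] :: pvGo [] rs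
    else pvGo (pend ++ [c]) rs

-- A's k-register as a function of the prefix decomposition
def pvKOf (pre pend : List Char) : Int :=
  match pend.findIdx? (fun c => PySem.Chars.isalnum c) with
  | some m => ((pre.length + m : Nat) : Int)
  | none => -1

-- the post-loop steps of the two ports, as functions of the loop state
def pvFinishA (cs : List Char) (r : List String × Int × Int) : List String :=
  if r.2.2 ≠ -1 then r.1 ++ [String.ofList (PySem.List.slice cs (some r.2.2) none)] else r.1

def pvFinishB (cs : List Char) (r : List String × Int) : List String :=
  match (PySem.List.enumerate (PySem.List.slice cs (some r.2) none) 0).find?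
      (fun p => PySem.Chars.isalnum p.2) with
  | some q =>
    r.1 ++ [String.ofList (PySem.List.slice (PySem.List.slice cs (some r.2) none) (some q.1) none)]
  | none => r.1

theorem pv_slice_mid (pre pend rest : List Char) :
    PySem.List.slice (pre ++ pend ++ rest) (some ((pre.length : Nat) : Int))
      (some (((pre.length + pend.length : Nat)) : Int)) = pend := by
  rw [PySem.List.slice_natCast]
  simp [List.append_assoc]

theorem pv_find?_enumerate (P : Char → Bool) (xs : List Char) : ∀ (s : Int),
    ((PySem.List.enumerate xs s).find? (fun p => P p.2)).map (·.1)
      = (xs.findIdx? P).map (fun m => s + (m : Int)) := by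
  induction xs with
  | nil => simp [PySem.List.enumerate_nil]
  | cons x xs ih =>
    intro s
    rw [PySem.List.enumerate_cons, List.findIdx?_cons]
    by_cases h : P x
    · simp [List.find?, h]
    · simp only [List.find?, h, Bool.false_eq_true, if_false]
      rw [ih (s+1)]
      cases hf : xs.findIdx? P <;> simp [Option.map] <;> push_cast <;> ring

theorem pv_kof_neg_one_iff (pre pend : List Char) :
    pvKOf pre pend = -1 ↔ pend.findIdx? (fun c => PySem.Chars.isalnum c) = none := by
  unfold pvKOf
  cases h : pend.findIdx? (fun c => PySem.Chars.isalnum c) <;> simp <;> omega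

theorem pv_kof_append_alnum (pre pend : List Char) (c : Char)
    (h : pvKOf pre pend = -1) (hc : PySem.Chars.isalnum c = true) :
    pvKOf pre (pend ++ [c]) = ((pre.length + pend.length : Nat) : Int) := by
  have hn := (pv_kof_neg_one_iff pre pend).mp h
  unfold pvKOf
  rw [List.findIdx?_append, hn]
  simp [List.findIdx?_cons, hc]

theorem pv_kof_append_other (pre pend : List Char) (c : Char)
    (h : ¬(PySem.Chars.isalnum c = true ∧ pvKOf pre pend = -1)) :
    pvKOf pre (pend ++ [c]) = pvKOf pre pend := by
  by_cases hk : pvKOf pre pend = -1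
  · have hc : PySem.Chars.isalnum c = false := by
      by_contra hc'
      exact h ⟨by simpa using hc', hk⟩
    have hn := (pv_kof_neg_one_iff pre pend).mp hk
    rw [hk]
    unfold pvKOf
    rw [List.findIdx?_append, hn, List.findIdx?_cons]
    simp [hc]
  · have : pend.findIdx? (fun c => PySem.Chars.isalnum c) ≠ none := by
      intro hn; exact hk ((pv_kof_neg_one_iff pre pend).mpr hn)
    obtain ⟨m, hm⟩ := Option.ne_none_iff_exists'.mp this
    unfold pvKOf
    rw [List.findIdx?_append, hm]
    simp

theorem pv_loopA (rest : List Char) : ∀ (pre pend : List Char) (acc : List String),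
    pvFinishA (pre ++ pend ++ rest)
      ((PySem.List.enumerate rest ((pre.length + pend.length : Nat) : Int)).foldl
        (pvStepA (pre ++ pend ++ rest)) (acc, ((pre.length : Nat) : Int), pvKOf pre pend))
      = acc ++ pvGo pend rest := by
  induction rest with
  | nil =>
    intro pre pend acc
    rw [PySem.List.enumerate_nil, List.foldl_nil]
    unfold pvFinishA pvGo pvKOf
    cases hf : pend.findIdx? (fun c => PySem.Chars.isalnum c) with
    | none => simp
    | some m =>
      have hm : m < pend.length := (List.findIdx?_eq_some_iff_findIdx_eq.mp hf).1
      simp only []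
      rw [if_pos (by push_cast; omega)]
      rw [PySem.List.slice_from_natCast]
      simp [List.drop_append]
  | cons c rs ih =>
    intro pre pend acc
    rw [PySem.List.enumerate_cons, List.foldl_cons]
    by_cases hs : pvIsSymbol c = true
    · have hstep : pvStepA (pre ++ pend ++ c :: rs)
          (acc, ((pre.length : Nat) : Int), pvKOf pre pend)
          ((((pre.length + pend.length : Nat)) : Int), c)
          = ((if pend = [] then acc else acc ++ [String.ofList pend]) ++ [String.ofList [c]],
             (((pre.length + pend.length : Nat)) : Int) + 1, -1) := by
        simp only [pvStepA]
        rw [if_pos hs]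
        by_cases hp : pend = []
        · subst hp; simp
        · have hlen : 0 < pend.length := List.length_pos_of_ne_nil hp
          rw [if_pos (by push_cast; omega), pv_slice_mid]
          simp [hp]
      rw [hstep]
      have h := ih (pre ++ pend ++ [c]) []
        ((if pend = [] then acc else acc ++ [String.ofList pend]) ++ [String.ofList [c]])
      rw [show pvKOf (pre ++ pend ++ [c]) [] = -1 from rfl] at h
      rw [show (pre ++ pend ++ [c]) ++ [] ++ rs = pre ++ pend ++ c :: rs from by simp] at h
      rw [show (((pre ++ pend ++ [c]).length + List.length ([] : List Char) : Nat) : Int)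
            = (((pre.length + pend.length : Nat)) : Int) + 1 from by
          push_cast [List.length_append, List.length_cons, List.length_nil]; ring] at h
      rw [show (((pre ++ pend ++ [c]).length : Nat) : Int)
            = (((pre.length + pend.length : Nat)) : Int) + 1 from by
          push_cast [List.length_append, List.length_cons, List.length_nil]; ring] at h
      conv_rhs => rw [pvGo]
      rw [if_pos hs]
      rw [show acc ++ ((if pend = [] then [] else [String.ofList pend])
              ++ String.ofList [c] :: pvGo [] rs)
            = ((if pend = [] then acc else acc ++ [String.ofList pend]) ++ [String.ofList [c]])
              ++ pvGo [] rs from by by_cases hp : pend = [] <;> simp [hp]]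
      exact h
    · by_cases ha : PySem.Chars.isalnum c = true ∧ pvKOf pre pend = -1
      · have hstep : pvStepA (pre ++ pend ++ c :: rs)
            (acc, ((pre.length : Nat) : Int), pvKOf pre pend)
            ((((pre.length + pend.length : Nat)) : Int), c)
            = (acc, ((pre.length : Nat) : Int), (((pre.length + pend.length : Nat)) : Int)) := by
          simp only [pvStepA]
          rw [if_neg hs, if_pos ha]
        rw [hstep]
        have h := ih pre (pend ++ [c]) acc
        rw [pv_kof_append_alnum pre pend c ha.2 ha.1] at h
        rw [show pre ++ (pend ++ [c]) ++ rs = pre ++ pend ++ c :: rs from by simp] at h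
        rw [show ((pre.length + (pend ++ [c]).length : Nat) : Int)
              = (((pre.length + pend.length : Nat)) : Int) + 1 from by
            push_cast [List.length_append, List.length_cons, List.length_nil]; ring] at h
        conv_rhs => rw [pvGo]
        rw [if_neg hs]
        exact h
      · have hstep : pvStepA (pre ++ pend ++ c :: rs)
            (acc, ((pre.length : Nat) : Int), pvKOf pre pend)
            ((((pre.length + pend.length : Nat)) : Int), c)
            = (acc, ((pre.length : Nat) : Int), pvKOf pre pend) := by
          simp only [pvStepA]
          rw [if_neg hs, if_neg ha]
        rw [hstep]
        have h := ih pre (pend ++ [c]) acc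
        rw [pv_kof_append_other pre pend c ha] at h
        rw [show pre ++ (pend ++ [c]) ++ rs = pre ++ pend ++ c :: rs from by simp] at h
        rw [show ((pre.length + (pend ++ [c]).length : Nat) : Int)
              = (((pre.length + pend.length : Nat)) : Int) + 1 from by
            push_cast [List.length_append, List.length_cons, List.length_nil]; ring] at h
        conv_rhs => rw [pvGo]
        rw [if_neg hs]
        exact h

theorem pv_loopB (rest : List Char) : ∀ (pre pend : List Char) (out : List String),
    (∀ c ∈ pend, pvIsSymbol c = false) →
    pvFinishB (pre ++ pend ++ rest)
      (((PySem.List.enumerate rest ((pre.length + pend.length : Nat) : Int)).filter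
          (fun p => pvIsSymbol p.2)).foldl (pvStepB (pre ++ pend ++ rest))
        (out, ((pre.length : Nat) : Int)))
      = out ++ pvGo pend rest := by
  induction rest with
  | nil =>
    intro pre pend out _
    rw [PySem.List.enumerate_nil, List.filter_nil, List.foldl_nil]
    unfold pvFinishB pvGo
    rw [show PySem.List.slice (pre ++ pend ++ []) (some ((pre.length : Nat) : Int)) none
          = pend from by rw [PySem.List.slice_from_natCast]; simp]
    have hfe := pv_find?_enumerate (fun c => PySem.Chars.isalnum c) pend 0
    cases hf : pend.findIdx? (fun c => PySem.Chars.isalnum c) with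
    | none =>
      rw [hf] at hfe
      cases hq : (PySem.List.enumerate pend 0).find? (fun p => PySem.Chars.isalnum p.2) with
      | some q => rw [hq] at hfe; simp at hfe
      | none => exact (List.append_nil out).symm
    | some m =>
      rw [hf] at hfe
      cases hq : (PySem.List.enumerate pend 0).find? (fun p => PySem.Chars.isalnum p.2) with
      | none => rw [hq] at hfe; simp at hfe
      | some q =>
        rw [hq] at hfe
        simp at hfe
        show out ++ [String.ofList (PySem.List.slice pend (some q.1) none)]
            = out ++ [String.ofList (pend.drop m)]
        rw [hfe, PySem.List.slice_from_natCast]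
  | cons c rs ih =>
    intro pre pend out hpend
    rw [PySem.List.enumerate_cons, List.filter_cons]
    by_cases hs : pvIsSymbol c = true
    · rw [if_pos (show pvIsSymbol ((((pre.length + pend.length : Nat)) : Int), c).2 = true from hs),
        List.foldl_cons]
      have hstep : pvStepB (pre ++ pend ++ c :: rs)
          (out, ((pre.length : Nat) : Int)) ((((pre.length + pend.length : Nat)) : Int), c)
          = ((if pend = [] then out else out ++ [String.ofList pend]) ++ [String.ofList [c]],
             (((pre.length + pend.length : Nat)) : Int) + 1) := by
        simp only [pvStepB]
        by_cases hp : pend = []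
        · subst hp; simp
        · have hlen : 0 < pend.length := List.length_pos_of_ne_nil hp
          rw [if_pos (by push_cast; omega), pv_slice_mid]
          simp [hp]
      rw [hstep]
      have h := ih (pre ++ pend ++ [c]) []
        ((if pend = [] then out else out ++ [String.ofList pend]) ++ [String.ofList [c]])
        (by intro x hx; cases hx)
      rw [show (pre ++ pend ++ [c]) ++ [] ++ rs = pre ++ pend ++ c :: rs from by simp] at h
      rw [show (((pre ++ pend ++ [c]).length + List.length ([] : List Char) : Nat) : Int)
            = (((pre.length + pend.length : Nat)) : Int) + 1 from by
          push_cast [List.length_append, List.length_cons, List.length_nil]; ring] at h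
      rw [show (((pre ++ pend ++ [c]).length : Nat) : Int)
            = (((pre.length + pend.length : Nat)) : Int) + 1 from by
          push_cast [List.length_append, List.length_cons, List.length_nil]; ring] at h
      conv_rhs => rw [pvGo]
      rw [if_pos hs]
      rw [show out ++ ((if pend = [] then [] else [String.ofList pend])
              ++ String.ofList [c] :: pvGo [] rs)
            = ((if pend = [] then out else out ++ [String.ofList pend]) ++ [String.ofList [c]])
              ++ pvGo [] rs from by by_cases hp : pend = [] <;> simp [hp]]
      exact h
    · rw [if_neg (show ¬ pvIsSymbol ((((pre.length + pend.length : Nat)) : Int), c).2 = true from hs)]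
      have hs' : pvIsSymbol c = false := by simpa using hs
      have h := ih pre (pend ++ [c]) out (by
        intro x hx
        rcases List.mem_append.mp hx with hx | hx
        · exact hpend x hx
        · rw [List.mem_singleton.mp hx]; exact hs')
      rw [show pre ++ (pend ++ [c]) ++ rs = pre ++ pend ++ c :: rs from by simp] at h
      rw [show ((pre.length + (pend ++ [c]).length : Nat) : Int)
            = (((pre.length + pend.length : Nat)) : Int) + 1 from by
          push_cast [List.length_append, List.length_cons, List.length_nil]; ring] at h
      conv_rhs => rw [pvGo]
      rw [if_neg hs]
      exact h

theorem pv_A_eq_go (word : String) : splitSymbols word = pvGo [] word.toList := by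
  have h0 : splitSymbols word
      = pvFinishA word.toList ((PySem.List.pyRange 0 (PySem.Str.len word) 1).foldl
          (fun st i => pvStepA word.toList st (i, PySem.List.pyGetD word.toList i ' '))
          ([], 0, -1)) := rfl
  rw [h0]
  have hmap : (PySem.List.pyRange 0 (PySem.Str.len word) 1).foldl
        (fun st i => pvStepA word.toList st (i, PySem.List.pyGetD word.toList i ' '))
        ([], 0, -1)
      = (PySem.List.enumerate word.toList 0).foldl (pvStepA word.toList) ([], 0, -1) := by
    rw [PySem.List.enumerate_eq_map_pyRange (d := ' '), List.foldl_map]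
    simp [PySem.Str.len_eq]
  rw [hmap]
  have h := pv_loopA word.toList [] [] []
  simpa using h

theorem pv_B_eq_go (word : String) : splitSymbols_alt word = pvGo [] word.toList := by
  have h0 : splitSymbols_alt word
      = pvFinishB word.toList (((PySem.List.enumerate word.toList 0).filter
          (fun p => pvIsSymbol p.2)).foldl (pvStepB word.toList) ([], 0)) := rfl
  rw [h0]
  have h := pv_loopB word.toList [] [] [] (by intro x hx; cases hx)
  simpa using h

-- ===== VERDICT (by name: the statement is the Claim_ definition above) =====
theorem splitSymbols_spec : Claim_equal_splitSymbols := by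
  intro word _
  unfold Spec_splitSymbols
  rw [pv_A_eq_go, pv_B_eq_go]
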